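-- pv_equiv track=rewrite | github.com/joreakshay/python | SimplePrograms/operations/bitwise_operator/bitwise.py | offrhightmostbit
-- ===== SOURCE A (Python) =====
-- def offrhightmostbit(num):
--    no=1
--
--    while(num >=no):
--       if num & no !=0:
--          break
--       no =no<<1
--    return num&(~no)
--
--    from sys import getsizeof
-- ===== SOURCE B (Python) =====
-- def offrhightmostbit(num):
--     # Closed form: clearing the lowest set bit of num.
--     return num & (num - 1)
-- ===== Notes on version B (the rewrite author's own statement) =====
-- stated objective: simpler
-- what changed: Replaces the bit-position scanning loop with the closed-form lowest-set-bit clear num & (num - 1).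
-- intended difference: On even negative num A's loop never runs and it returns num & ~1 = num unchanged, while B returns num & (num - 1), which clears the rightmost set bit as the function's name intends. — e.g. on offrhightmostbit(-2): A returns -2, B returns -4
import Mathlib
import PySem

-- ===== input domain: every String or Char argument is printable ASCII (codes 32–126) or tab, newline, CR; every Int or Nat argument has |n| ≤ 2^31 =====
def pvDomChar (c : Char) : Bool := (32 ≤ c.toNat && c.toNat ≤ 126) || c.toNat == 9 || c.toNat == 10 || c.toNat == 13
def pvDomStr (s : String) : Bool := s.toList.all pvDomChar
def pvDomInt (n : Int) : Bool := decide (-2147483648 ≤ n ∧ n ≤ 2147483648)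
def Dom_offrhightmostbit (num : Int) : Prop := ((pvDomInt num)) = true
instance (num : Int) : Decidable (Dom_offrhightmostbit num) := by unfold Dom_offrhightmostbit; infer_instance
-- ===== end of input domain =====

-- B replaces A's bit-position scanning loop by the closed form num & (num - 1) (simpler);
-- on even negative num A's loop never runs and A returns num unchanged — stated as D_ below.

-- ===== PORT A =====
-- the while loop: `while num >= no: if num & no != 0: break; no = no << 1`, then `return num & ~no`.
-- The conjunct `0 < no` in the guard is a totality guard only: every actual call has no = 1 << k ≥ 1.
def offAux (num no : Int) : Int :=
  if h : no ≤ num ∧ 0 < no then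
    if Int.land num no ≠ 0 then Int.land num (Int.lnot no)   -- break, then num & ~no
    else offAux num (no * 2)                                 -- no = no << 1 (shift by one = *2, exact)
  else Int.land num (Int.lnot no)                            -- loop never entered / exited by condition
termination_by (num + 1 - no).toNat
decreasing_by omega

def offrhightmostbit (num : Int) : Int := offAux num 1

-- ===== PORT B =====
def offrhightmostbit_alt (num : Int) : Int := Int.land num (num - 1)

-- ===== PRECONDITION & SPEC =====
-- On even negative num, A's loop never runs and it returns num & ~1 = num unchanged (leftover
-- initial state), while B returns num & (num - 1), which clears the rightmost set bit as the
-- function's name intends.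
def D_offrhightmostbit (num : Int) : Prop := num < 0 ∧ num % 2 = 0
instance (num : Int) : Decidable (D_offrhightmostbit num) := by unfold D_offrhightmostbit; infer_instance

def Spec_offrhightmostbit (num : Int) (out : Int) : Prop := ¬ D_offrhightmostbit num → out = offrhightmostbit_alt num
instance (num : Int) (out : Int) : Decidable (Spec_offrhightmostbit num out) := by unfold Spec_offrhightmostbit; infer_instance

def pvDiffWitness_offrhightmostbit : Int := (-2)
def pvDiffWitnessOut_offrhightmostbit : Int × Int := (-2, -4)

-- ===== CLAIM (what is proved, stated in full; the proofs are below) =====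
def Claim_unchanged_offrhightmostbit : Prop := ∀ (num : Int), Dom_offrhightmostbit num → Spec_offrhightmostbit num (offrhightmostbit num)
def Claim_changed_offrhightmostbit : Prop := Dom_offrhightmostbit (pvDiffWitness_offrhightmostbit) ∧ D_offrhightmostbit (pvDiffWitness_offrhightmostbit) ∧ offrhightmostbit (pvDiffWitness_offrhightmostbit) = pvDiffWitnessOut_offrhightmostbit.1 ∧ offrhightmostbit_alt (pvDiffWitness_offrhightmostbit) = pvDiffWitnessOut_offrhightmostbit.2 ∧ pvDiffWitnessOut_offrhightmostbit.1 ≠ pvDiffWitnessOut_offrhightmostbit.2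
def Claim_exact_offrhightmostbit : Prop := ∀ (num : Int), Dom_offrhightmostbit num → D_offrhightmostbit num → offrhightmostbit num ≠ offrhightmostbit_alt num

-- ===== LEMMAS AND PROOFS =====

theorem land_neg_one (m : Int) : Int.land m (-1) = m := by
  cases m with
  | ofNat n =>
      show Int.land (Int.ofNat n) (Int.negSucc 0) = Int.ofNat n
      show (Nat.ldiff n 0 : Int) = Int.ofNat n
      congr 1
      apply Nat.eq_of_testBit_eq
      intro i
      simp [Nat.testBit_ldiff]
  | negSucc n =>
      show Int.negSucc (n ||| 0) = Int.negSucc n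
      simp

theorem land_zero (m : Int) : Int.land m 0 = 0 := by
  cases m with
  | ofNat n =>
      show Int.land (Int.ofNat n) (Int.ofNat 0) = 0
      show (Int.ofNat (n &&& 0)) = 0
      simp [Nat.and_zero]
  | negSucc n =>
      show (Nat.ldiff 0 n : Int) = 0
      have : Nat.ldiff 0 n = 0 := by
        apply Nat.eq_of_testBit_eq
        intro i
        simp [Nat.testBit_ldiff]
      simp [this]

theorem zero_land (m : Int) : Int.land 0 m = 0 := by
  cases m with
  | ofNat n =>
      show (Int.ofNat (0 &&& n)) = 0
      simp
  | negSucc n =>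
      show (Nat.ldiff 0 n : Int) = 0
      have : Nat.ldiff 0 n = 0 := by
        apply Nat.eq_of_testBit_eq
        intro i
        simp [Nat.testBit_ldiff]
      simp [this]

theorem land_self_int (m : Int) : Int.land m m = m := by
  cases m with
  | ofNat n =>
      show (Int.ofNat (n &&& n)) = Int.ofNat n
      simp [Nat.and_self]
  | negSucc n =>
      show Int.negSucc (n ||| n) = Int.negSucc n
      simp

theorem one_eq_bit : (1 : Int) = Int.bit true 0 := by
  rw [Int.bit_val]; decide

theorem two_pow_succ_eq_bit (k : Nat) : ((2:Int) ^ (k+1)) = Int.bit false (2 ^ k) := by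
  rw [Int.bit_val]; simp only [Bool.cond_false]; ring

theorem testBit0_mod (num : Int) : num.testBit 0 = decide (num % 2 = 1) := by
  induction num using Int.bitCasesOn with
  | h b m =>
      rw [Int.testBit_bit_zero]
      have hv : Int.bit b m = 2 * m + cond b 1 0 := Int.bit_val b m
      cases b <;> simp [hv]

theorem land_two_pow (k : Nat) : ∀ (num : Int),
    Int.land num (2 ^ k) = if num.testBit k then 2 ^ k else 0 := by
  induction k with
  | zero =>
      intro num
      induction num using Int.bitCasesOn with
      | h b m =>
          rw [pow_zero, one_eq_bit, Int.land_bit, Int.testBit_bit_zero, land_zero]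
          cases b <;> simp [Int.bit_val]
  | succ k ih =>
      intro num
      induction num using Int.bitCasesOn with
      | h b m =>
          rw [two_pow_succ_eq_bit, Int.land_bit, ih m,
            show (k+1) = Nat.succ k from rfl, Int.testBit_bit_succ]
          by_cases h : m.testBit k <;>
            simp only [h, reduceIte, Bool.false_eq_true, if_false,
              Int.bit_val, Bool.and_false, Bool.cond_false] <;> ring_nf

theorem land_sub_one (k : Nat) : ∀ (num : Int), num.testBit k = true →
    (∀ j, j < k → num.testBit j = false) →
    Int.land num (num - 1) = num - 2 ^ k := by
  induction k with
  | zero =>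
      intro num h1 _
      induction num using Int.bitCasesOn with
      | h b m =>
          rw [Int.testBit_bit_zero] at h1; subst h1
          have hsub : Int.bit true m - 1 = Int.bit false m := by
            simp only [Int.bit_val, Bool.cond_true, Bool.cond_false]; ring
          rw [hsub, Int.land_bit, land_self_int]
          simp only [Int.bit_val, Bool.cond_true, Bool.cond_false, Bool.true_and, pow_zero]
          ring
  | succ k ih =>
      intro num h1 h2
      induction num using Int.bitCasesOn with
      | h b m =>
          have hb : b = false := by
            have := h2 0 (Nat.succ_pos k)
            rwa [Int.testBit_bit_zero] at this
          subst hb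
          have hsub : Int.bit false m - 1 = Int.bit true (m - 1) := by
            simp only [Int.bit_val, Bool.cond_true, Bool.cond_false]; ring
          have hm1 : m.testBit k = true := by
            rw [← Int.testBit_bit_succ k false m]; exact h1
          have hm2 : ∀ j, j < k → m.testBit j = false := by
            intro j hj
            rw [← Int.testBit_bit_succ j false m]
            exact h2 (j+1) (by omega)
          rw [hsub, Int.land_bit]
          simp only [Bool.false_and]
          rw [Int.bit_val, ih m hm1 hm2]
          simp only [Int.bit_val, Bool.cond_false]
          ring

theorem land_lnot_pow (k : Nat) : ∀ (num : Int), num.testBit k = true →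
    (∀ j, j < k → num.testBit j = false) →
    Int.land num (Int.lnot (2 ^ k)) = num - 2 ^ k := by
  induction k with
  | zero =>
      intro num h1 _
      induction num using Int.bitCasesOn with
      | h b m =>
          rw [Int.testBit_bit_zero] at h1; subst h1
          have hlnot : Int.lnot ((2:Int) ^ 0) = Int.bit false (-1) := by
            rw [Int.bit_val]; decide
          rw [hlnot, Int.land_bit, land_neg_one]
          simp only [Int.bit_val, Bool.cond_true, Bool.cond_false, Bool.and_false, pow_zero]
          ring
  | succ k ih =>
      intro num h1 h2
      induction num using Int.bitCasesOn with
      | h b m =>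
          have hb : b = false := by
            have := h2 0 (Nat.succ_pos k)
            rwa [Int.testBit_bit_zero] at this
          subst hb
          have hm1 : m.testBit k = true := by
            rw [← Int.testBit_bit_succ k false m]; exact h1
          have hm2 : ∀ j, j < k → m.testBit j = false := by
            intro j hj
            rw [← Int.testBit_bit_succ j false m]
            exact h2 (j+1) (by omega)
          rw [two_pow_succ_eq_bit, Int.lnot_bit, Int.land_bit]
          simp only [Bool.false_and]
          rw [Int.bit_val, ih m hm1 hm2]
          simp only [Int.bit_val, Bool.cond_false]
          ring

theorem land_lnot_one_even (num : Int) (h : num.testBit 0 = false) :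
    Int.land num (Int.lnot 1) = num := by
  induction num using Int.bitCasesOn with
  | h b m =>
      rw [Int.testBit_bit_zero] at h; subst h
      have hlnot : Int.lnot (1 : Int) = Int.bit false (-1) := by
        rw [Int.bit_val]; decide
      rw [hlnot, Int.land_bit, land_neg_one]
      simp only [Bool.and_false]

theorem ge_two_pow_of_low_false (num : Int) (k : Nat) (h0 : 0 < num)
    (hl : ∀ j, j < k → num.testBit j = false) : (2:Int) ^ k ≤ num := by
  cases num with
  | ofNat n =>
      have hn : n ≠ 0 := by
        intro h; subst h; simp at h0
      obtain ⟨i, hi⟩ := Nat.exists_testBit_of_ne_zero hn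
      have htb : ∀ j, (Int.ofNat n).testBit j = n.testBit j := fun _ => rfl
      have hik : k ≤ i := by
        by_contra hik
        have := hl i (by omega)
        rw [htb] at this
        rw [this] at hi; exact absurd hi (by simp)
      have h1 : 2 ^ i ≤ n := Nat.ge_two_pow_of_testBit hi
      have h2 : (2:Nat) ^ k ≤ 2 ^ i := Nat.pow_le_pow_right (by omega) hik
      have : (2:Nat) ^ k ≤ n := le_trans h2 h1
      have := Int.ofNat_le.mpr this
      simpa using this
  | negSucc n => exact absurd h0 (by exact of_decide_eq_false rfl)

theorem aux_eq (num : Int) : ∀ (n k : Nat), (num + 1 - 2 ^ k).toNat ≤ n → 0 < num →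
    (∀ j, j < k → num.testBit j = false) →
    offAux num (2 ^ k) = Int.land num (num - 1) := by
  intro n
  induction n with
  | zero =>
      intro k hn h0 hl
      exfalso
      have hge : (2:Int) ^ k ≤ num := ge_two_pow_of_low_false num k h0 hl
      omega
  | succ n ih =>
      intro k hn h0 hl
      have hge : (2:Int) ^ k ≤ num := ge_two_pow_of_low_false num k h0 hl
      have hpos : (0:Int) < 2 ^ k := by positivity
      rw [offAux, dif_pos ⟨hge, hpos⟩]
      rw [land_two_pow k num]
      by_cases hb : num.testBit k
      · rw [if_pos hb]
        have : ((2:Int) ^ k ≠ 0) := by omega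
        rw [if_pos this, land_lnot_pow k num hb hl, land_sub_one k num hb hl]
      · rw [if_neg hb]
        simp only [ne_eq, not_true_eq_false, if_false]
        have hstep : (2:Int) ^ k * 2 = 2 ^ (k + 1) := by ring
        rw [hstep]
        apply ih (k + 1) _ h0
        · intro j hj
          rcases Nat.lt_succ_iff_lt_or_eq.mp hj with h | h
          · exact hl j h
          · subst h; exact eq_false_of_ne_true hb
        · have : (2:Int) ^ (k+1) = 2 ^ k * 2 := by ring
          omega

theorem exists_lowest_bit : ∀ (n : Nat) (num : Int), num.natAbs ≤ n → num ≠ 0 →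
    ∃ k, num.testBit k = true ∧ ∀ j, j < k → num.testBit j = false := by
  intro n
  induction n with
  | zero =>
      intro num hn hne
      exfalso; apply hne; omega
  | succ n ih =>
      intro num hn hne
      by_cases hb : num.testBit 0
      · exact ⟨0, hb, by omega⟩
      · induction num using Int.bitCasesOn with
        | h b m =>
            rw [Int.testBit_bit_zero] at hb
            have hbf : b = false := by simpa using hb
            subst hbf
            have hv : Int.bit false m = 2 * m := by
              simp only [Int.bit_val, Bool.cond_false]; ring
            have hmne : m ≠ 0 := by
              intro h; subst h; apply hne; rw [hv]; simp
            have hmabs : m.natAbs ≤ n := by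
              have h2 : (Int.bit false m).natAbs = 2 * m.natAbs := by
                rw [hv]; simp [Int.natAbs_mul]
              omega
            obtain ⟨k, hk1, hk2⟩ := ih m hmabs hmne
            refine ⟨k + 1, ?_, ?_⟩
            · rw [show (k+1) = Nat.succ k from rfl, Int.testBit_bit_succ]; exact hk1
            · intro j hj
              cases j with
              | zero => rw [Int.testBit_bit_zero]
              | succ j => rw [Int.testBit_bit_succ]; exact hk2 j (by omega)

theorem offA_neg (num : Int) (h : num < 1) : offrhightmostbit num = Int.land num (Int.lnot 1) := by
  rw [offrhightmostbit, offAux, dif_neg]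
  intro ⟨h1, _⟩; omega

-- ===== VERDICT (by name: the statement is the Claim_ definition above) =====
theorem offrhightmostbit_spec : Claim_unchanged_offrhightmostbit := by
  intro num _ hnd
  show offrhightmostbit num = offrhightmostbit_alt num
  rw [offrhightmostbit_alt]
  by_cases h0 : 0 < num
  · rw [offrhightmostbit, show (1:Int) = 2 ^ 0 by norm_num]
    exact aux_eq num (num + 1 - 2 ^ 0).toNat 0 (le_refl _) h0 (by omega)
  · rcases eq_or_lt_of_le (by omega : num ≤ 0) with h | h
    · subst h
      rw [offA_neg 0 (by omega)]
      show Int.land 0 (Int.lnot 1) = Int.land 0 (0 - 1)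
      rw [zero_land, zero_land]
    · -- num < 0; ¬D_ forces num odd
      have hodd : num % 2 = 1 := by
        have : ¬ (num % 2 = 0) := fun hc => hnd ⟨h, hc⟩
        omega
      have htb : num.testBit 0 = true := by
        rw [testBit0_mod]; simp [hodd]
      have hA : Int.land num (Int.lnot 1) = num - 1 := by
        have := land_lnot_pow 0 num htb (by omega)
        simpa using this
      have hB : Int.land num (num - 1) = num - 1 := by
        have := land_sub_one 0 num htb (by omega)
        simpa using this
      rw [offA_neg num (by omega), hA, hB]

theorem offrhightmostbit_changed : Claim_changed_offrhightmostbit := by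
  unfold Claim_changed_offrhightmostbit
  refine ⟨by decide, by decide, ?_, by decide, by decide⟩
  rw [pvDiffWitness_offrhightmostbit, offA_neg (-2) (by omega)]
  decide

theorem offrhightmostbit_tight : Claim_exact_offrhightmostbit := by
  intro num _ ⟨hneg, heven⟩
  have htb : num.testBit 0 = false := by
    rw [testBit0_mod]; simp; omega
  have hA : offrhightmostbit num = num := by
    rw [offA_neg num (by omega), land_lnot_one_even num htb]
  obtain ⟨k, hk1, hk2⟩ := exists_lowest_bit num.natAbs num (le_refl _) (by omega)
  have hB : offrhightmostbit_alt num = num - 2 ^ k := by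
    rw [offrhightmostbit_alt]; exact land_sub_one k num hk1 hk2
  rw [hA, hB]
  have : (0:Int) < 2 ^ k := by positivity
  omega
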